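-- pv_equiv track=rewrite | github.com/erichaase/topcoder-python | topcoder/fan_failure.py | solution
-- ===== SOURCE A (Python) =====
-- def solution (capacities, min_cooling):
--     capacities = sorted(capacities)
--
--     # calculate MFS
--     mfs = 0
--     total = sum(capacities)
--     for i in range(len(capacities)):
--         total -= capacities[i]
--         if total >= min_cooling:
--             mfs += 1
--         else:
--             break
--
--     # calculate MFC
--     mfc = 0
--     total = sum(capacities)
--     for i in reversed(range(len(capacities))):
--         total -= capacities[i]
--         if total >= min_cooling:
--             mfc += 1
--         else:
--             break
--
--     return [mfs, mfc]
-- ===== SOURCE B (Python) =====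
-- def _first_false(n, pred):
--     # least index in [0, n] at which pred is false (pred must be a prefix property)
--     lo, hi = 0, n
--     while lo < hi:
--         mid = (lo + hi) // 2
--         if pred(mid):
--             lo = mid + 1
--         else:
--             hi = mid
--     return lo
--
--
-- def solution(capacities, min_cooling):
--     caps = sorted(capacities)
--     n = len(caps)
--
--     # prefix sums P[1..n] of the sorted list
--     prefixes = []
--     s = 0
--     for c in caps:
--         s += c
--         prefixes.append(s)
--     total = s
--
--     # running max of the prefix sums: runmax[i] = max(prefixes[0..i]),
--     # so runmax[i] <= total - min_cooling  <=>  every one of the first i+1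
--     # smallest-fan removals keeps the remaining total >= min_cooling.
--     runmax = []
--     h = None
--     for p in prefixes:
--         h = p if h is None or p > h else h
--         runmax.append(h)
--
--     # remaining totals after removing the largest fans are P[n-1], P[n-2], ..., P[0];
--     # runmin[i] = min of the first i+1 of those.
--     lows = [0] + prefixes[:-1]
--     runmin = []
--     g = None
--     for p in reversed(lows):
--         g = p if g is None or p < g else g
--         runmin.append(g)
--
--     key = total - min_cooling
--     mfs = _first_false(n, lambda i: runmax[i] <= key)
--     mfc = _first_false(n, lambda i: runmin[i] >= min_cooling)
--     return [mfs, mfc]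
-- ===== Notes on version B (the rewrite author's own statement) =====
-- stated objective: alternative
-- what changed: Replaces A's two break-on-failure scans with prefix sums plus running max/min arrays, then finds each removal count by binary search over those monotone arrays.
import Mathlib
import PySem

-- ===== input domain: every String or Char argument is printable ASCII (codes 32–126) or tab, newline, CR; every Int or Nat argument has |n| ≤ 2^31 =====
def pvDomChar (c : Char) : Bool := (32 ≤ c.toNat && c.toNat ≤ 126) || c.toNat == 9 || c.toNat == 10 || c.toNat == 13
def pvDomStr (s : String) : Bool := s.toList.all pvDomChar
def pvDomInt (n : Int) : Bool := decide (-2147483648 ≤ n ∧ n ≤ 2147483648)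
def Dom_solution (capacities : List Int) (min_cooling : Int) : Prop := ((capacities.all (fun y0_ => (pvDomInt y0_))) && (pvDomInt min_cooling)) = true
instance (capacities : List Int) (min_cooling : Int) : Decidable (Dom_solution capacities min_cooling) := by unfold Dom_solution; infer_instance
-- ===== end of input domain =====

-- B replaces A's break-on-failure scans by prefix sums with running max/min and binary searches (objective: alternative).

-- ===== PORT A =====
-- A's two index loops walk the sorted list front-to-back resp. back-to-front,
-- subtracting the removed capacity and breaking on the first failure; ported as
-- one structural recursion over the traversed list carrying the running total.
def pvLoopA (m : Int) : List Int → Int → Int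
  | [], _ => 0
  | c :: rest, total =>
    let t := total - c
    if m ≤ t then 1 + pvLoopA m rest t else 0

def solution (capacities : List Int) (min_cooling : Int) : List Int :=
  let caps := PySem.List.sorted capacities (fun x => x) false
  let total := caps.foldl (· + ·) 0
  let mfs := pvLoopA min_cooling caps total
  let mfc := pvLoopA min_cooling caps.reverse total
  [mfs, mfc]

-- ===== PORT B =====
-- prefix sums of the loop `for c in caps: s += c; prefixes.append(s)`
def pvPrefixes : List Int → Int → List Int
  | [], _ => []
  | c :: rest, s => (s + c) :: pvPrefixes rest (s + c)

def pvRunMax : List Int → Option Int → List Int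
  | [], _ => []
  | p :: rest, h =>
    let h' := match h with | none => p | some v => if v < p then p else v
    h' :: pvRunMax rest (some h')

def pvRunMin : List Int → Option Int → List Int
  | [], _ => []
  | p :: rest, g =>
    let g' := match g with | none => p | some v => if p < v then p else v
    g' :: pvRunMin rest (some g')

-- hand-written binary search of Source B (no imports available there); the list
-- accesses inside pred are always in range during the search, so `getD` is exact
def pvFirstFalse (pred : Nat → Bool) (lo hi : Nat) : Nat :=
  if h : lo < hi then
    let mid := (lo + hi) / 2
    if pred mid then pvFirstFalse pred (mid + 1) hi else pvFirstFalse pred lo mid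
  else lo
termination_by hi - lo
decreasing_by all_goals omega

def solution_alt (capacities : List Int) (min_cooling : Int) : List Int :=
  let caps := PySem.List.sorted capacities (fun x => x) false
  let n := caps.length
  let prefixes := pvPrefixes caps 0
  let total := caps.foldl (· + ·) 0
  let runmax := pvRunMax prefixes none
  let lows := 0 :: prefixes.dropLast
  let runmin := pvRunMin lows.reverse none
  let key := total - min_cooling
  let mfs := pvFirstFalse (fun i => decide (runmax.getD i 0 ≤ key)) 0 n
  let mfc := pvFirstFalse (fun i => decide (min_cooling ≤ runmin.getD i 0)) 0 n
  [(mfs : Int), (mfc : Int)]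

-- ===== PRECONDITION & SPEC =====
def Spec_solution (capacities : List Int) (min_cooling : Int) (out : List Int) : Prop := out = solution_alt capacities min_cooling
instance (capacities : List Int) (min_cooling : Int) (out : List Int) : Decidable (Spec_solution capacities min_cooling out) := by unfold Spec_solution; infer_instance

-- ===== CLAIM (what is proved, stated in full; the proofs are below) =====
def Claim_equal_solution : Prop := ∀ (capacities : List Int) (min_cooling : Int), Dom_solution capacities min_cooling → Spec_solution capacities min_cooling (solution capacities min_cooling)

-- ===== LEMMAS AND PROOFS =====

theorem pvPrefixes_length (cs : List Int) (s : Int) : (pvPrefixes cs s).length = cs.length := by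
  induction cs generalizing s with
  | nil => rfl
  | cons c rest ih => simp [pvPrefixes, ih]

theorem pvPrefixes_getD (cs : List Int) (s : Int) (j : Nat) (hj : j < cs.length) :
    (pvPrefixes cs s).getD j 0 = s + ((cs.take (j + 1)).sum) := by
  induction cs generalizing s j with
  | nil => simp at hj
  | cons c rest ih =>
    cases j with
    | zero => simp [pvPrefixes]
    | succ j =>
      simp only [pvPrefixes, List.getD_cons_succ, List.take_succ_cons, List.sum_cons]
      rw [ih (s + c) j (by simpa using hj)]
      ring

theorem pvRunMax_getD (ps : List Int) (h : Option Int) (i : Nat) (hi : i < ps.length) (key : Int) :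
    ((pvRunMax ps h).getD i 0 ≤ key ↔
      (∀ j, j ≤ i → ps.getD j 0 ≤ key) ∧ (∀ v, h = some v → v ≤ key)) := by
  induction ps generalizing h i with
  | nil => simp at hi
  | cons p rest ih =>
    have hcomb : ∀ key : Int, ((match h with | none => p | some v => if v < p then p else v) ≤ key)
        ↔ (p ≤ key ∧ ∀ v, h = some v → v ≤ key) := by
      intro key
      cases h with
      | none => simp
      | some v =>
        constructor
        · intro hle
          by_cases hv : v < p <;> simp [hv] at hle <;>
            exact ⟨by omega, by intro w hw; cases hw; omega⟩
        · rintro ⟨hp, hv⟩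
          have := hv v rfl
          by_cases hvp : v < p <;> simp [hvp] <;> omega
    cases i with
    | zero =>
      simp only [pvRunMax, List.getD_cons_zero]
      rw [hcomb key]
      constructor
      · rintro ⟨hp, hv⟩
        exact ⟨by intro j hj; interval_cases j; simpa using hp, hv⟩
      · rintro ⟨hj, hv⟩
        exact ⟨by simpa using hj 0 (le_refl 0), hv⟩
    | succ i =>
      simp only [pvRunMax, List.getD_cons_succ]
      rw [ih _ i (by simpa using hi)]
      constructor
      · rintro ⟨hrest, hh⟩
        have := (hcomb key).mp (hh _ rfl)
        constructor
        · intro j hj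
          cases j with
          | zero => simpa using this.1
          | succ j => simpa using hrest j (by omega)
        · exact this.2
      · rintro ⟨hall, hv⟩
        refine ⟨fun j hj => by simpa using hall (j + 1) (by omega), ?_⟩
        rintro w hw
        cases hw
        exact (hcomb key).mpr ⟨by simpa using hall 0 (by omega), hv⟩

theorem pvRunMin_getD (ps : List Int) (h : Option Int) (i : Nat) (hi : i < ps.length) (key : Int) :
    (key ≤ (pvRunMin ps h).getD i 0 ↔
      (∀ j, j ≤ i → key ≤ ps.getD j 0) ∧ (∀ v, h = some v → key ≤ v)) := by
  induction ps generalizing h i with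
  | nil => simp at hi
  | cons p rest ih =>
    have hcomb : ∀ key : Int, (key ≤ (match h with | none => p | some v => if p < v then p else v))
        ↔ (key ≤ p ∧ ∀ v, h = some v → key ≤ v) := by
      intro key
      cases h with
      | none => simp
      | some v =>
        constructor
        · intro hle
          by_cases hv : p < v <;> simp [hv] at hle <;>
            exact ⟨by omega, by intro w hw; cases hw; omega⟩
        · rintro ⟨hp, hv⟩
          have := hv v rfl
          by_cases hvp : p < v <;> simp [hvp] <;> omega
    cases i with
    | zero =>
      simp only [pvRunMin, List.getD_cons_zero]
      rw [hcomb key]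
      constructor
      · rintro ⟨hp, hv⟩
        exact ⟨by intro j hj; interval_cases j; simpa using hp, hv⟩
      · rintro ⟨hj, hv⟩
        exact ⟨by simpa using hj 0 (le_refl 0), hv⟩
    | succ i =>
      simp only [pvRunMin, List.getD_cons_succ]
      rw [ih _ i (by simpa using hi)]
      constructor
      · rintro ⟨hrest, hh⟩
        have := (hcomb key).mp (hh _ rfl)
        constructor
        · intro j hj
          cases j with
          | zero => simpa using this.1
          | succ j => simpa using hrest j (by omega)
        · exact this.2
      · rintro ⟨hall, hv⟩
        refine ⟨fun j hj => by simpa using hall (j + 1) (by omega), ?_⟩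
        rintro w hw
        cases hw
        exact (hcomb key).mpr ⟨by simpa using hall 0 (by omega), hv⟩

theorem pvFirstFalse_spec (pred : Nat → Bool) (n : Nat) :
    ∀ (fuel lo hi : Nat), hi - lo ≤ fuel → lo ≤ hi → hi ≤ n →
    (∀ i j, i ≤ j → j < n → pred j = true → pred i = true) →
    (∀ i, i < lo → pred i = true) →
    (hi < n → pred hi = false) →
    lo ≤ pvFirstFalse pred lo hi ∧ pvFirstFalse pred lo hi ≤ hi ∧
      (∀ i, i < pvFirstFalse pred lo hi → pred i = true) ∧
      (pvFirstFalse pred lo hi < n → pred (pvFirstFalse pred lo hi) = false) := by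
  intro fuel
  induction fuel with
  | zero =>
    intro lo hi hfuel hlo hhi dc hbelow habove
    have hnlt : ¬ lo < hi := by omega
    rw [pvFirstFalse, dif_neg hnlt]
    have heq : lo = hi := by omega
    exact ⟨le_refl _, hlo, hbelow, fun h => heq ▸ habove (heq ▸ h)⟩
  | succ fuel ih =>
    intro lo hi hfuel hlo hhi dc hbelow habove
    by_cases hlt : lo < hi
    · have hm1 : lo ≤ (lo + hi) / 2 := by omega
      have hm2 : (lo + hi) / 2 < hi := by omega
      rw [pvFirstFalse, dif_pos hlt]
      by_cases hp : pred ((lo + hi) / 2) = true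
      · simp only [hp, if_true]
        have := ih ((lo + hi) / 2 + 1) hi (by omega) (by omega) hhi dc
          (fun i hi' => dc i ((lo + hi) / 2) (by omega) (by omega) hp) habove
        exact ⟨by omega, this.2.1, this.2.2.1, this.2.2.2⟩
      · have hp' : pred ((lo + hi) / 2) = false := by simpa using hp
        simp only [hp', Bool.false_eq_true, if_false]
        have := ih lo ((lo + hi) / 2) (by omega) (by omega) (by omega) dc
          hbelow (fun _ => hp')
        exact ⟨this.1, by omega, this.2.2.1, this.2.2.2⟩
    · have heq : lo = hi := by omega
      rw [pvFirstFalse, dif_neg hlt]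
      exact ⟨le_refl _, hlo, hbelow, fun h => heq ▸ habove (heq ▸ h)⟩

theorem pvLoopA_spec (m : Int) (cs : List Int) (T : Int) :
    ∃ k : Nat, pvLoopA m cs T = (k : Int) ∧ k ≤ cs.length ∧
      (∀ i, i < k → m ≤ T - ((cs.take (i + 1)).sum)) ∧
      (k < cs.length → ¬ (m ≤ T - ((cs.take (k + 1)).sum))) := by
  induction cs generalizing T with
  | nil => exact ⟨0, rfl, by simp, by omega, by simp⟩
  | cons c rest ih =>
    simp only [pvLoopA]
    by_cases hc : m ≤ T - c
    · rw [if_pos hc]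
      obtain ⟨k, hk, hle, hall, hfail⟩ := ih (T - c)
      refine ⟨k + 1, by rw [hk]; push_cast; ring, by simpa using hle, ?_, ?_⟩
      · intro i hi
        cases i with
        | zero => simpa using hc
        | succ i =>
          have := hall i (by omega)
          simp only [List.take_succ_cons, List.sum_cons]
          omega
      · intro hkl
        have := hfail (by simpa using hkl)
        simp only [List.take_succ_cons, List.sum_cons]
        omega
    · rw [if_neg hc]
      exact ⟨0, rfl, by simp, by omega, fun _ => by simpa using hc⟩

theorem pv_first_unique {ok : Nat → Prop} {n k1 k2 : Nat} (h1 : k1 ≤ n) (h2 : k2 ≤ n)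
    (a1 : ∀ i, i < k1 → ok i) (b1 : k1 < n → ¬ ok k1)
    (a2 : ∀ i, i < k2 → ok i) (b2 : k2 < n → ¬ ok k2) : k1 = k2 := by
  rcases lt_trichotomy k1 k2 with h | h | h
  · exact absurd (a2 _ h) (b1 (lt_of_lt_of_le h h2))
  · exact h
  · exact absurd (a1 _ h) (b2 (lt_of_lt_of_le h h1))

theorem pv_sum_take_reverse (cs : List Int) (k : Nat) :
    ((cs.reverse.take k).sum) = cs.sum - ((cs.take (cs.length - k)).sum) := by
  rw [List.take_reverse, List.sum_reverse]
  have h2 := List.sum_take_add_sum_drop cs (cs.length - k)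
  omega

theorem pv_lows_getD (cs : List Int) (t : Nat) (ht : t < cs.length) :
    (((0 : Int) :: (pvPrefixes cs 0).dropLast).getD t 0) = (cs.take t).sum := by
  cases t with
  | zero => simp
  | succ t' =>
    rw [List.getD_cons_succ]
    have ht' : t' < (pvPrefixes cs 0).dropLast.length := by
      simp [List.length_dropLast, pvPrefixes_length]; omega
    rw [List.getD_eq_getElem _ 0 ht', List.getElem_dropLast,
      ← List.getD_eq_getElem _ 0, pvPrefixes_getD cs 0 t' (by omega)]
    simp

theorem pv_revlows_getD (cs : List Int) (j : Nat) (hj : j < cs.length) :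
    ((((0 : Int) :: (pvPrefixes cs 0).dropLast).reverse).getD j 0) = (cs.take (cs.length - 1 - j)).sum := by
  have hlen : ((0 : Int) :: (pvPrefixes cs 0).dropLast).length = cs.length := by
    simp [List.length_dropLast, pvPrefixes_length]; omega
  rw [List.getD_eq_getElem _ 0 (by simp only [List.length_reverse, hlen]; exact hj),
    List.getElem_reverse, ← List.getD_eq_getElem _ 0]
  rw [hlen]
  exact pv_lows_getD cs (cs.length - 1 - j) (by omega)

-- mfs component: A's forward loop equals B's binary search over the running max
theorem pv_mfs_eq (cs : List Int) (m : Int) :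
    pvLoopA m cs (cs.foldl (· + ·) 0) =
      ((pvFirstFalse (fun i => decide ((pvRunMax (pvPrefixes cs 0) none).getD i 0 ≤ cs.foldl (· + ·) 0 - m)) 0 cs.length : Nat) : Int) := by
  set T := cs.foldl (· + ·) 0 with hT
  set n := cs.length with hn
  set pred := fun i => decide ((pvRunMax (pvPrefixes cs 0) none).getD i 0 ≤ T - m) with hpred
  have hchar : ∀ i, i < n → (pred i = true ↔ ∀ j, j ≤ i → (cs.take (j + 1)).sum ≤ T - m) := by
    intro i hi
    simp only [hpred, decide_eq_true_iff]
    rw [pvRunMax_getD _ none i (by rw [pvPrefixes_length]; exact hi)]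
    constructor
    · intro h j hj
      have := h.1 j hj
      rwa [pvPrefixes_getD cs 0 j (by omega), zero_add] at this
    · intro h
      refine ⟨fun j hj => ?_, by simp⟩
      rw [pvPrefixes_getD cs 0 j (by omega), zero_add]
      exact h j hj
  have dc : ∀ i j, i ≤ j → j < n → pred j = true → pred i = true := by
    intro i j hij hj hpj
    rw [hchar i (by omega)]
    intro j' hj'
    exact (hchar j hj).mp hpj j' (by omega)
  obtain ⟨hF0, hFle, hFall, hFfail⟩ :=
    pvFirstFalse_spec pred n n 0 n (by omega) (by omega) (le_refl n) dc
      (by omega) (fun h => absurd h (lt_irrefl n))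
  obtain ⟨k, hk, hkle, hall, hfail⟩ := pvLoopA_spec m cs T
  rw [hk]
  congr 1
  refine pv_first_unique (ok := fun i => m ≤ T - (cs.take (i + 1)).sum) hkle hFle hall hfail ?_ ?_
  · intro i hi
    have := (hchar i (by omega)).mp (hFall i hi) i (le_refl i)
    omega
  · intro hFn hok
    have hf := hFfail hFn
    have hub : ∀ j, j ≤ pvFirstFalse pred 0 n → (cs.take (j + 1)).sum ≤ T - m := by
      intro j hj
      rcases Nat.lt_or_ge j (pvFirstFalse pred 0 n) with h | h
      · have := (hchar j (by omega)).mp (hFall j h) j (le_refl j)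
        omega
      · have : j = pvFirstFalse pred 0 n := by omega
        subst this
        omega
    have hptrue : pred (pvFirstFalse pred 0 n) = true := (hchar _ (by omega)).mpr hub
    simp [hptrue] at hf

-- mfc component: A's backward loop equals B's binary search over the running min
theorem pv_mfc_eq (cs : List Int) (m : Int) :
    pvLoopA m cs.reverse (cs.foldl (· + ·) 0) =
      ((pvFirstFalse (fun i => decide (m ≤ (pvRunMin (((0 : Int) :: (pvPrefixes cs 0).dropLast).reverse) none).getD i 0)) 0 cs.length : Nat) : Int) := by
  set T := cs.foldl (· + ·) 0 with hT
  have hTS : T = cs.sum := (List.sum_eq_foldl).symm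
  set n := cs.length with hn
  set pred := fun i => decide (m ≤ (pvRunMin (((0 : Int) :: (pvPrefixes cs 0).dropLast).reverse) none).getD i 0) with hpred
  have hrevlen : n ≤ (((0 : Int) :: (pvPrefixes cs 0).dropLast).reverse).length := by
    simp [List.length_dropLast, pvPrefixes_length]
    omega
  have hchar : ∀ i, i < n → (pred i = true ↔ ∀ j, j ≤ i → m ≤ (cs.take (n - 1 - j)).sum) := by
    intro i hi
    simp only [hpred, decide_eq_true_iff]
    rw [pvRunMin_getD _ none i (lt_of_lt_of_le hi hrevlen)]
    constructor
    · intro h j hj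
      have := h.1 j hj
      rwa [pv_revlows_getD cs j (by omega)] at this
    · intro h
      refine ⟨fun j hj => ?_, by simp⟩
      rw [pv_revlows_getD cs j (by omega)]
      exact h j hj
  have hok : ∀ i, i < n → ((m ≤ T - (cs.reverse.take (i + 1)).sum) ↔ m ≤ (cs.take (n - 1 - i)).sum) := by
    intro i hi
    rw [pv_sum_take_reverse cs (i + 1)]
    have : n - (i + 1) = n - 1 - i := by omega
    rw [hTS, ← hn, this]
    omega
  have dc : ∀ i j, i ≤ j → j < n → pred j = true → pred i = true := by
    intro i j hij hj hpj
    rw [hchar i (by omega)]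
    intro j' hj'
    exact (hchar j hj).mp hpj j' (by omega)
  obtain ⟨hF0, hFle, hFall, hFfail⟩ :=
    pvFirstFalse_spec pred n n 0 n (by omega) (by omega) (le_refl n) dc
      (by omega) (fun h => absurd h (lt_irrefl n))
  obtain ⟨k, hk, hkle, hall, hfail⟩ := pvLoopA_spec m cs.reverse T
  rw [hk]
  congr 1
  have hrl : cs.reverse.length = n := by simp [hn]
  refine pv_first_unique (ok := fun i => m ≤ T - (cs.reverse.take (i + 1)).sum)
    (hrl ▸ hkle) hFle hall (by rw [hrl] at hfail; exact hfail) ?_ ?_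
  · intro i hi
    have hin : i < n := by omega
    rw [hok i hin]
    exact (hchar i hin).mp (hFall i hi) i (le_refl i)
  · intro hFn hcontra
    have hf := hFfail hFn
    have hBall : ∀ j, j ≤ pvFirstFalse pred 0 n → m ≤ (cs.take (n - 1 - j)).sum := by
      intro j hj
      rcases Nat.lt_or_ge j (pvFirstFalse pred 0 n) with h | h
      · exact (hchar j (by omega)).mp (hFall j h) j (le_refl j)
      · have : j = pvFirstFalse pred 0 n := by omega
        subst this
        exact (hok _ hFn).mp hcontra
    have hptrue : pred (pvFirstFalse pred 0 n) = true := (hchar _ (by omega)).mpr hBall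
    simp [hptrue] at hf

-- ===== VERDICT (by name: the statement is the Claim_ definition above) =====
theorem solution_spec : Claim_equal_solution := by
  unfold Claim_equal_solution Spec_solution
  intro capacities min_cooling _
  simp only [solution, solution_alt, List.cons.injEq, and_true]
  exact ⟨pv_mfs_eq _ _, pv_mfc_eq _ _⟩
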